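-- pv_equiv track=rewrite | github.com/HappynessI/verl-for-AgentGym | examples/sglang_multiturn/my_exp/legacy/entropy_analysis/profile_performance.py | build_prefix_for_turn
-- ===== SOURCE A (Python) =====
-- def build_prefix_for_turn(conversations, turn_idx, role="assistant"):
--     """构建该 turn 之前的上下文（不包含 target turn 本身）"""
--     prefix_messages = []
--     role_count = 0
--     for msg in conversations:
--         msg_role = msg.get("role", "")
--         if msg_role == role:
--             if role_count == turn_idx:
--                 break
--             role_count += 1
--         prefix_messages.append(msg)
--     return prefix_messages
-- ===== SOURCE B (Python) =====
-- def build_prefix_for_turn(conversations, turn_idx, role="assistant"):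
--     """Index-then-slice: find all positions of `role` messages, slice before the turn_idx-th."""
--     positions = [i for i, msg in enumerate(conversations) if msg.get("role", "") == role]
--     if 0 <= turn_idx < len(positions):
--         return conversations[:positions[turn_idx]]
--     return list(conversations)
-- ===== Notes on version B (the rewrite author's own statement) =====
-- stated objective: simpler
-- what changed: Replaces the append-with-counter-and-break loop by a two-phase index-then-slice: build the list of positions of role messages, then slice the conversation before the turn_idx-th position (whole list if turn_idx is out of range).
import Mathlib
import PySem

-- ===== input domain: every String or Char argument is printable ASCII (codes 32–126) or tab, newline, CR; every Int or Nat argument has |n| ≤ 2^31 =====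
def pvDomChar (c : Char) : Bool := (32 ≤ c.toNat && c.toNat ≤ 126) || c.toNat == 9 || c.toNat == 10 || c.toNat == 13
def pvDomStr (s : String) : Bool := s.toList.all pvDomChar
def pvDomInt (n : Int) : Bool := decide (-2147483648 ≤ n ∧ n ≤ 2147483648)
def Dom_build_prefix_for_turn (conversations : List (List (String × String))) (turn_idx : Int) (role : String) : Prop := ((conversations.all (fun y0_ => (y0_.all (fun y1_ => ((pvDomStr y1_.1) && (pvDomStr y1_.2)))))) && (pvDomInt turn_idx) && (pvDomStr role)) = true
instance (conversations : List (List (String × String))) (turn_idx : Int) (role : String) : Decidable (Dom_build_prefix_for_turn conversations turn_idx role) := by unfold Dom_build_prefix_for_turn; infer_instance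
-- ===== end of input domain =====

-- B replaces A's append-with-counter-and-break loop by a two-phase index-then-slice decomposition (objective: simpler).


-- shared dict semantics: msg.get("role", "") — first match in the association list
def pvGetRole (msg : List (String × String)) : String :=
  (((msg.find? (fun p => p.1 == "role")).map (·.2)).getD "")

-- ===== PORT A =====
-- the for-loop with break, as structural recursion over (remaining messages, role_count)
def pvGoA (turn_idx : Int) (role : String) : List (List (String × String)) → Int → List (List (String × String))
  | [], _ => []
  | msg :: rest, role_count =>
    if pvGetRole msg == role then
      if role_count == turn_idx then []
      else msg :: pvGoA turn_idx role rest (role_count + 1)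
    else msg :: pvGoA turn_idx role rest role_count

def build_prefix_for_turn (conversations : List (List (String × String))) (turn_idx : Int) (role : String) : List (List (String × String)) :=
  pvGoA turn_idx role conversations 0

-- ===== PORT B =====
def build_prefix_for_turn_alt (conversations : List (List (String × String))) (turn_idx : Int) (role : String) : List (List (String × String)) :=
  let positions : List Int :=
    (PySem.List.enumerate conversations 0).filterMap
      (fun p => if pvGetRole p.2 == role then some p.1 else none)
  if 0 ≤ turn_idx ∧ turn_idx < (positions.length : Int) then
    PySem.List.slice conversations none (some (PySem.List.pyGetD positions turn_idx 0))
  else conversations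

-- ===== PRECONDITION & SPEC =====
def Spec_build_prefix_for_turn (conversations : List (List (String × String))) (turn_idx : Int) (role : String) (out : List (List (String × String))) : Prop := out = build_prefix_for_turn_alt conversations turn_idx role
instance (conversations : List (List (String × String))) (turn_idx : Int) (role : String) (out : List (List (String × String))) : Decidable (Spec_build_prefix_for_turn conversations turn_idx role out) := by unfold Spec_build_prefix_for_turn; infer_instance

-- ===== CLAIM (what is proved, stated in full; the proofs are below) =====
def Claim_equal_build_prefix_for_turn : Prop := ∀ (conversations : List (List (String × String))) (turn_idx : Int) (role : String), Dom_build_prefix_for_turn conversations turn_idx role → Spec_build_prefix_for_turn conversations turn_idx role (build_prefix_for_turn conversations turn_idx role)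

-- ===== LEMMAS AND PROOFS =====

-- the positions list, parametric in the enumerate start
def pvPos (role : String) (xs : List (List (String × String))) (s : Int) : List Int :=
  (PySem.List.enumerate xs s).filterMap (fun p => if pvGetRole p.2 == role then some p.1 else none)

lemma pvPos_cons (role : String) (m : List (String × String)) (rest : List (List (String × String))) (s : Int) :
    pvPos role (m :: rest) s =
      if pvGetRole m == role then s :: pvPos role rest (s + 1) else pvPos role rest (s + 1) := by
  by_cases h : pvGetRole m = role <;>
    simp [pvPos, PySem.List.enumerate_cons, h]

lemma pvPos_shift (role : String) (xs : List (List (String × String))) (s : Int) :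
    pvPos role xs s = (pvPos role xs 0).map (· + s) := by
  induction xs generalizing s with
  | nil => simp [pvPos]
  | cons m rest ih =>
    rw [pvPos_cons, pvPos_cons]
    by_cases h : pvGetRole m == role
    · rw [if_pos h, if_pos h, ih (s + 1), ih (0 + 1)]
      simp [List.map_map]
      intro a _; omega
    · rw [if_neg h, if_neg h, ih (s + 1), ih (0 + 1)]
      simp [List.map_map]
      intro a _; omega

lemma pvPos_nonneg (role : String) (xs : List (List (String × String))) (s : Int) :
    ∀ a ∈ pvPos role xs s, s ≤ a := by
  intro a ha
  simp only [pvPos, List.mem_filterMap] at ha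
  obtain ⟨p, hp, hpa⟩ := ha
  rw [PySem.List.mem_enumerate_iff] at hp
  obtain ⟨k, hk, rfl⟩ := hp
  by_cases h : pvGetRole xs[k] == role
  · simp [h] at hpa; omega
  · simp [h] at hpa

lemma pvAlt_eq (xs : List (List (String × String))) (t : Int) (role : String) :
    build_prefix_for_turn_alt xs t role =
      if 0 ≤ t ∧ t < ((pvPos role xs 0).length : Int) then
        PySem.List.slice xs none (some (PySem.List.pyGetD (pvPos role xs 0) t 0))
      else xs := rfl

lemma pvSlice_cons (m : List (String × String)) (xs : List (List (String × String))) (q : Int) (hq : 0 ≤ q) :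
    PySem.List.slice (m :: xs) none (some (q + 1)) = m :: PySem.List.slice xs none (some q) := by
  rw [PySem.List.slice_to (m :: xs) (by omega), PySem.List.slice_to xs hq]
  have h1 : (q + 1).toNat = q.toNat + 1 := by omega
  rw [h1, List.take_succ_cons]

lemma pvGetD_map_add_one (P : List Int) (i : Int) (h0 : 0 ≤ i) (h1 : i < (P.length : Int)) :
    PySem.List.pyGetD (P.map (· + 1)) i 0 = PySem.List.pyGetD P i 0 + 1 := by
  rw [PySem.List.pyGetD_eq_getElem (P.map (· + 1)) 0 h0 (by simpa using h1),
      PySem.List.pyGetD_eq_getElem P 0 h0 h1]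
  simp

lemma pvGetD_cons_pos (x : Int) (P : List Int) (i : Int) (h0 : 1 ≤ i) (h1 : i < (P.length : Int) + 1) :
    PySem.List.pyGetD (x :: P) i 0 = PySem.List.pyGetD P (i - 1) 0 := by
  rw [PySem.List.pyGetD_eq_getElem (x :: P) 0 (by omega) (by simp; omega),
      PySem.List.pyGetD_eq_getElem P 0 (by omega) (by omega)]
  have h2 : i.toNat = (i - 1).toNat + 1 := by omega
  simp only [h2, List.getElem_cons_succ]

lemma pvGoA_shift (role : String) (xs : List (List (String × String))) :
    ∀ (c t : Int), pvGoA t role xs c = pvGoA (t - c) role xs 0 := by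
  induction xs with
  | nil => intro c t; rfl
  | cons m rest ih =>
    intro c t
    simp only [pvGoA]
    by_cases h : (pvGetRole m == role) = true
    · rw [if_pos h, if_pos h]
      by_cases hct : c = t
      · subst hct; simp
      · rw [show (c == t) = false from beq_eq_false_iff_ne.2 hct,
            show ((0 : Int) == t - c) = false from beq_eq_false_iff_ne.2 (by omega)]
        simp only [Bool.false_eq_true, if_false]
        rw [ih (c + 1) t, ih (0 + 1) (t - c), show t - (c + 1) = t - c - (0 + 1) from by ring]
    · rw [Bool.not_eq_true] at h
      rw [h]
      simp only [Bool.false_eq_true, if_false]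
      rw [ih c t, ih 0 (t - c), show t - c - 0 = t - c from by ring]

-- main: A's loop equals B's index-then-slice
lemma pvMain (role : String) (xs : List (List (String × String))) (t : Int) :
    pvGoA t role xs 0 = build_prefix_for_turn_alt xs t role := by
  induction xs generalizing t with
  | nil =>
    rw [pvAlt_eq]
    simp only [pvGoA, pvPos, PySem.List.enumerate_nil, List.filterMap_nil, List.length_nil]
    rw [if_neg (by omega)]
  | cons m rest ih =>
    rw [pvAlt_eq, pvPos_cons]
    simp only [pvGoA]
    by_cases h : (pvGetRole m == role) = true
    · rw [if_pos h, if_pos h, pvPos_shift role rest (0 + 1)]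
      set P := pvPos role rest 0 with hP
      by_cases hz : t = 0
      · subst hz
        have hcnd : (0 : Int) ≤ 0 ∧ (0 : Int) < ((((0 : Int) :: P.map (· + (0 + 1))).length : Nat) : Int) :=
          ⟨le_refl 0, by exact_mod_cast Nat.succ_pos _⟩
        rw [if_pos hcnd, PySem.List.pyGetD_zero_cons,
            PySem.List.slice_to (m :: rest) (by omega)]
        simp
      · rw [show ((0 : Int) == t) = false from beq_eq_false_iff_ne.2 (by omega)]
        simp only [Bool.false_eq_true, if_false]
        rw [pvGoA_shift role rest (0 + 1) t, show t - (0 + 1) = t - 1 from by ring,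
            ih (t - 1), pvAlt_eq, ← hP]
        by_cases hc : 0 ≤ t - 1 ∧ t - 1 < (P.length : Int)
        · rw [if_pos hc, if_pos (by simp only [List.length_cons, List.length_map]; push_cast; omega)]
          rw [pvGetD_cons_pos _ _ _ (by omega) (by simp only [List.length_map]; omega)]
          have hmap : (P.map (· + (0 + 1))) = P.map (· + 1) := by norm_num
          rw [hmap, pvGetD_map_add_one P (t - 1) hc.1 hc.2]
          have hq : 0 ≤ PySem.List.pyGetD P (t - 1) 0 := by
            apply pvPos_nonneg role rest 0
            exact PySem.List.pyGetD_mem P 0 ⟨by omega, hc.2⟩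
          rw [pvSlice_cons _ _ _ hq]
        · rw [if_neg hc, if_neg (by simp only [List.length_cons, List.length_map]; push_cast; omega)]
    · rw [Bool.not_eq_true] at h
      rw [h]
      simp only [Bool.false_eq_true, if_false]
      rw [ih t, pvAlt_eq, pvPos_shift role rest (0 + 1)]
      set P := pvPos role rest 0 with hP
      by_cases hc : 0 ≤ t ∧ t < (P.length : Int)
      · rw [if_pos hc, if_pos (by simp only [List.length_map]; omega)]
        have hmap : (P.map (· + (0 + 1))) = P.map (· + 1) := by norm_num
        rw [hmap, pvGetD_map_add_one P t hc.1 hc.2]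
        have hq : 0 ≤ PySem.List.pyGetD P t 0 := by
          apply pvPos_nonneg role rest 0
          exact PySem.List.pyGetD_mem P 0 ⟨by omega, hc.2⟩
        rw [pvSlice_cons _ _ _ hq]
      · rw [if_neg hc, if_neg (by simp only [List.length_map]; omega)]

-- ===== VERDICT (by name: the statement is the Claim_ definition above) =====
theorem build_prefix_for_turn_spec : Claim_equal_build_prefix_for_turn := by
  intro conversations turn_idx role _
  unfold Spec_build_prefix_for_turn build_prefix_for_turn
  exact pvMain role conversations turn_idx
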